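-- pv_equiv track=rewrite | github.com/Craw1123/CV | en_de.py | generate_knapsack
-- ===== SOURCE A (Python) =====
-- def generate_knapsack(n):
--     knapsack = [1]
--     sum_so_far = 1
--     for _ in range(n-1):
--         new_element = sum_so_far + knapsack[-1]
--         knapsack.append(new_element)
--         sum_so_far += new_element
--     return knapsack
-- ===== SOURCE B (Python) =====
-- def generate_knapsack(n):
--     if n <= 1:
--         return [1]
--     a, b = 1, 1
--     result = [1]
--     for _ in range(n - 1):
--         c = 3 * b - a
--         result.append(c)
--         a, b = b, c
--     return result
-- ===== Notes on version B (the rewrite author's own statement) =====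
-- stated objective: alternative
-- what changed: Replaces the running-sum accumulator with the two-term linear recurrence a_{k+1} = 3*a_k - a_{k-1}, keeping only the last two elements instead of a cumulative sum.
import Mathlib
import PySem

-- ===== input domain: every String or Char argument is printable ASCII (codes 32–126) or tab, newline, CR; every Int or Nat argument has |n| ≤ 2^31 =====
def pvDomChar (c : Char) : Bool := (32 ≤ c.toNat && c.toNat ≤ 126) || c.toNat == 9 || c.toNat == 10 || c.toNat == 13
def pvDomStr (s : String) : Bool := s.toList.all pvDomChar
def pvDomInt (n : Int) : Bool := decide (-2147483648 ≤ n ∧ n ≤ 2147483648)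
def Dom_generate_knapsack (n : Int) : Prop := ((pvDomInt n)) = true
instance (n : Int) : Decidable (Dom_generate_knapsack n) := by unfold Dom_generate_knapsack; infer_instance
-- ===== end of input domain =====

-- B replaces A's running-sum accumulator with the two-term recurrence a_{k+1} = 3*a_k - a_{k-1} (alternative decomposition, same cost).

-- ===== PORT A =====
-- A's loop over range(n-1): state = (knapsack, sum_so_far); knapsack[-1] via PySem.List.pyGet? (-1)
-- (the list is never empty, so the IndexError branch is unreachable; getD 0 is never taken).
def knapLoopA : Nat → List Int → Int → List Int
  | 0, ks, _ => ks
  | k + 1, ks, s =>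
      let ne := s + ((PySem.List.pyGet? ks (-1)).getD 0)
      knapLoopA k (ks ++ [ne]) (s + ne)

def generate_knapsack (n : Int) : List Int := knapLoopA (n - 1).toNat [1] 1

-- ===== PORT B =====
-- B's loop: state = (a, b, result); c = 3*b - a each step.
def knapLoopB : Nat → Int → Int → List Int → List Int
  | 0, _, _, r => r
  | k + 1, a, b, r =>
      let c := 3 * b - a
      knapLoopB k b c (r ++ [c])

def generate_knapsack_alt (n : Int) : List Int :=
  if n ≤ 1 then [1] else knapLoopB (n - 1).toNat 1 1 [1]

-- ===== PRECONDITION & SPEC =====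
def Spec_generate_knapsack (n : Int) (out : List Int) : Prop := out = generate_knapsack_alt n
instance (n : Int) (out : List Int) : Decidable (Spec_generate_knapsack n out) := by unfold Spec_generate_knapsack; infer_instance

-- ===== CLAIM (what is proved, stated in full; the proofs are below) =====
def Claim_equal_generate_knapsack : Prop := ∀ (n : Int), Dom_generate_knapsack n → Spec_generate_knapsack n (generate_knapsack n)

-- ===== LEMMAS AND PROOFS =====

-- Invariant: result list nonempty with last element b, and sum_so_far = 2*b - a.
theorem knapLoop_eq (k : Nat) : ∀ (ks : List Int) (a b : Int),
    ks.getLast? = some b → knapLoopA k ks (2 * b - a) = knapLoopB k a b ks := by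
  induction k with
  | zero => intro ks a b _; rfl
  | succ k ih =>
      intro ks a b hlast
      simp only [knapLoopA, knapLoopB, PySem.List.pyGet?_neg_one, hlast, Option.getD_some]
      have h1 : 2 * b - a + b = 3 * b - a := by ring
      have h2 : 2 * b - a + (3 * b - a) = 2 * (3 * b - a) - b := by ring
      rw [h1, h2, ih (ks ++ [3 * b - a]) b (3 * b - a) (by simp)]

-- ===== VERDICT (by name: the statement is the Claim_ definition above) =====
theorem generate_knapsack_spec : Claim_equal_generate_knapsack := by
  unfold Claim_equal_generate_knapsack Spec_generate_knapsack
  intro n _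
  unfold generate_knapsack generate_knapsack_alt
  by_cases h : n ≤ 1
  · have h0 : (n - 1).toNat = 0 := by omega
    rw [if_pos h, h0]; rfl
  · rw [if_neg h]
    have := knapLoop_eq (n - 1).toNat [1] 1 1 (by simp)
    norm_num only at this
    exact this
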